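-- pv_equiv track=rewrite | github.com/Izzienjeri/docker | app.py | getInaccurateProcesses
-- ===== SOURCE A (Python) =====
-- def getInaccurateProcesses(processOrder: list[int], executionOrder: list[int]) -> int:
--     """
--     Counts the number of elements in `executionOrder` that do not maintain their relative order as present in `processOrder`.
--     Args:
--         processOrder: A list of integers representing the intended process order.
--         executionOrder: A list of integers representing the actual execution order.
--     Returns:
--         An integer representing the number of elements executed out of order.
--     """
--     # Create a mapping of process ID to its position in processOrder
--     process_positions = {pid: i for i, pid in enumerate(processOrder)}
--     out_of_order = set()
--     n = len(executionOrder)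
--     # Compare each pair of processes in executionOrder
--     for i in range(n):
--         for j in range(i + 1, n):
--             # Get the positions of these processes in the original order
--             pos_i = process_positions[executionOrder[i]]
--             pos_j = process_positions[executionOrder[j]]
--             # If their relative order is different, both processes are out of order
--             if pos_i > pos_j:
--                 out_of_order.add(executionOrder[i])
--                 out_of_order.add(executionOrder[j])
--     return len(out_of_order)
-- ===== SOURCE B (Python) =====
-- def getInaccurateProcesses(processOrder: list[int], executionOrder: list[int]) -> int:
--     # O(n): an element is part of an inversion iff it is smaller than some
--     # earlier position (prefix-max pass) or larger than some later position
--     # (suffix-min pass); count the distinct marked values.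
--     process_positions = {pid: i for i, pid in enumerate(processOrder)}
--     pos = [process_positions[p] for p in executionOrder]
--     # pass 1 (left to right): mark x if a strictly larger position occurs before it
--     marked = []
--     mx = None
--     for x in pos:
--         marked.append(mx is not None and x < mx)
--         if mx is None or x > mx:
--             mx = x
--     # pass 2 (right to left): also mark x if a strictly smaller position occurs after it
--     marked2 = []
--     mn = None
--     for x, m in reversed(list(zip(pos, marked))):
--         marked2.append(m or (mn is not None and x > mn))
--         if mn is None or x < mn:
--             mn = x
--     marked2.reverse()
--     return len({p for p, m in zip(executionOrder, marked2) if m})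
-- ===== Notes on version B (the rewrite author's own statement) =====
-- stated objective: faster
-- what changed: Replaces the quadratic all-pairs inversion scan with two linear passes (prefix-max and suffix-min over positions) that mark each element involved in any inversion, then counts the distinct marked values. Pre_ requires every executed id to appear in processOrder: A's lazy pair-loop only looks ids up when a pair exists, so on a length-<=1 executionOrder with an unknown id A returns 0 while B's eager position lookup raises KeyError.
-- outside the precondition, e.g. on getInaccurateProcesses([1], [5]): A returns 0, B raises KeyError
import Mathlib
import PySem

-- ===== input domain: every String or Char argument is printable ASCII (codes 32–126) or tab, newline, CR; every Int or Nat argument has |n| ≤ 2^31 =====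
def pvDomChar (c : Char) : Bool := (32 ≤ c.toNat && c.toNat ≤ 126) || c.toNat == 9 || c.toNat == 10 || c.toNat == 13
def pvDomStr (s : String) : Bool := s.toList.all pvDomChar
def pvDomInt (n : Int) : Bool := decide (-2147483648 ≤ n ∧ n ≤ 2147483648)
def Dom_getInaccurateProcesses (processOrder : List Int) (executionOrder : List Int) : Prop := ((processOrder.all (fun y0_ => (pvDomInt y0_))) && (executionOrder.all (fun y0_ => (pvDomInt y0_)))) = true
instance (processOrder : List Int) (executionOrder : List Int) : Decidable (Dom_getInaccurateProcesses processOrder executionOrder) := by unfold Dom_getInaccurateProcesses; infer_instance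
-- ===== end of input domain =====

-- B replaces A's quadratic all-pairs inversion scan by two linear passes
-- (prefix-max / suffix-min over positions) marking the elements involved in an
-- inversion, then counts the distinct marked values (objective: faster).

-- ===== PORT A =====
-- process_positions = {pid: i for i, pid in enumerate(processOrder)}  (shared by both Pythons verbatim)
def pvPositions (processOrder : List Int) : PySem.Dict Int Int :=
  (PySem.List.enumerate processOrder 0).foldl (fun d p => d.insert p.2 p.1) PySem.Dict.empty

-- literal port of A's nested pair loop; 'process_positions[x]' raises KeyError on a
-- missing key, so the port reads it as getD _ 0 and Pre_ excludes exactly those inputs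
def getInaccurateProcesses (processOrder : List Int) (executionOrder : List Int) : Int :=
  let pp := pvPositions processOrder
  let n : Int := executionOrder.length
  let s : PySem.Set Int :=
    (PySem.List.pyRange 0 n 1).foldl (fun s i =>
      (PySem.List.pyRange (i + 1) n 1).foldl (fun s j =>
        if pp.getD (PySem.List.pyGetD executionOrder j 0) 0 <
           pp.getD (PySem.List.pyGetD executionOrder i 0) 0 then
          PySem.Set.add (PySem.Set.add s (PySem.List.pyGetD executionOrder i 0))
            (PySem.List.pyGetD executionOrder j 0)
        else s) s)
      PySem.Set.empty
  PySem.Set.len s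

-- ===== PORT B =====
-- 'if mx is None or x > mx: mx = x'
def pvOmax (mx : Option Int) (x : Int) : Option Int :=
  some (match mx with | none => x | some m => if m < x then x else m)

-- 'if mn is None or x < mn: mn = x'
def pvOmin (mn : Option Int) (x : Int) : Option Int :=
  some (match mn with | none => x | some m => if x < m then x else m)

-- 'mx is not None and x < mx'
def pvLtB (mx : Option Int) (x : Int) : Bool :=
  match mx with | none => false | some m => decide (x < m)

-- 'mn is not None and x > mn'
def pvGtB (mn : Option Int) (x : Int) : Bool :=
  match mn with | none => false | some m => decide (m < x)

-- pass 1: left-to-right loop over pos accumulating mx, appending one mark per element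
def pvPass1 : List Int → Option Int → List Bool
  | [], _ => []
  | x :: xs, mx => pvLtB mx x :: pvPass1 xs (pvOmax mx x)

-- pass 2: loop over reversed(list(zip(pos, marked))) accumulating mn
def pvPass2 : List (Int × Bool) → Option Int → List Bool
  | [], _ => []
  | (x, m) :: rest, mn => (m || pvGtB mn x) :: pvPass2 rest (pvOmin mn x)

def getInaccurateProcesses_alt (processOrder : List Int) (executionOrder : List Int) : Int :=
  let pp := pvPositions processOrder
  let pos := executionOrder.map (fun p => pp.getD p 0)
  let marked := pvPass1 pos none
  let marked2 := (pvPass2 ((pos.zip marked).reverse) none).reverse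
  PySem.Set.len (PySem.Set.ofList
    (((executionOrder.zip marked2).filter (fun pm => pm.2)).map (fun pm => pm.1)))

-- ===== PRECONDITION & SPEC =====
-- Pre_ excludes the inputs with an executed process id absent from processOrder: there
-- Python A raises KeyError whenever a pair exists (len >= 2), and on a length-<=1
-- executionOrder with an unknown id A returns 0 while B's eager position lookup raises.
def Pre_getInaccurateProcesses (processOrder : List Int) (executionOrder : List Int) : Prop :=
  ∀ x ∈ executionOrder, x ∈ processOrder
instance (processOrder : List Int) (executionOrder : List Int) : Decidable (Pre_getInaccurateProcesses processOrder executionOrder) := by unfold Pre_getInaccurateProcesses; infer_instance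

def pvWitness_getInaccurateProcesses : List Int × List Int := ([4, 7, 2], [7, 2, 4])

def Spec_getInaccurateProcesses (processOrder : List Int) (executionOrder : List Int) (out : Int) : Prop := out = getInaccurateProcesses_alt processOrder executionOrder
instance (processOrder : List Int) (executionOrder : List Int) (out : Int) : Decidable (Spec_getInaccurateProcesses processOrder executionOrder out) := by unfold Spec_getInaccurateProcesses; infer_instance

-- ===== CLAIM (what is proved, stated in full; the proofs are below) =====
def Claim_equal_getInaccurateProcesses : Prop := ∀ (processOrder : List Int) (executionOrder : List Int), Dom_getInaccurateProcesses processOrder executionOrder → Pre_getInaccurateProcesses processOrder executionOrder → Spec_getInaccurateProcesses processOrder executionOrder (getInaccurateProcesses processOrder executionOrder)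

-- ===== LEMMAS AND PROOFS =====

-- generic membership / nodup facts about set-building folds
theorem pv_mem_foldl {β : Type} (v : Int) (P : β → Prop) (F : PySem.Set Int → β → PySem.Set Int)
    (hF : ∀ s j, v ∈ F s j ↔ v ∈ s ∨ P j) :
    ∀ (l : List β) (s : PySem.Set Int), v ∈ l.foldl F s ↔ v ∈ s ∨ ∃ j ∈ l, P j := by
  intro l
  induction l with
  | nil => simp
  | cons a l ih =>
    intro s
    simp only [List.foldl_cons, ih, hF, List.mem_cons]
    constructor
    · rintro ((h | h) | ⟨j, hj, hP⟩)
      · exact Or.inl h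
      · exact Or.inr ⟨a, Or.inl rfl, h⟩
      · exact Or.inr ⟨j, Or.inr hj, hP⟩
    · rintro (h | ⟨j, (rfl | hj), hP⟩)
      · exact Or.inl (Or.inl h)
      · exact Or.inl (Or.inr hP)
      · exact Or.inr ⟨j, hj, hP⟩

theorem pv_nodup_foldl {β : Type} (F : PySem.Set Int → β → PySem.Set Int)
    (hF : ∀ s j, s.Nodup → (F s j).Nodup) :
    ∀ (l : List β) (s : PySem.Set Int), s.Nodup → (l.foldl F s).Nodup := by
  intro l
  induction l with
  | nil => simp only [List.foldl_nil]; exact fun _ h => h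
  | cons a l ih => intro s hs; exact ih _ (hF _ _ hs)

theorem pass1_length : ∀ (xs : List Int) (mx : Option Int), (pvPass1 xs mx).length = xs.length := by
  intro xs
  induction xs with
  | nil => intro _; rfl
  | cons x xs ih => intro mx; simp [pvPass1, ih]

theorem pass2_length : ∀ (l : List (Int × Bool)) (mn : Option Int), (pvPass2 l mn).length = l.length := by
  intro l
  induction l with
  | nil => intro _; rfl
  | cons p l ih => intro mn; cases p; simp [pvPass2, ih]

theorem pvLtB_omax (mx : Option Int) (x z : Int) :
    pvLtB (pvOmax mx x) z = (pvLtB mx z || decide (z < x)) := by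
  cases mx with
  | none => simp [pvLtB, pvOmax]
  | some m =>
    simp only [pvLtB, pvOmax]
    by_cases h : m < x <;> simp [h] <;> omega

theorem pvGtB_omin (mn : Option Int) (x z : Int) :
    pvGtB (pvOmin mn x) z = (pvGtB mn z || decide (x < z)) := by
  cases mn with
  | none => simp [pvGtB, pvOmin]
  | some m =>
    simp only [pvGtB, pvOmin]
    by_cases h : x < m <;> simp [h] <;> omega

theorem pass1_spec : ∀ (xs : List Int) (mx : Option Int) (i : Nat), i < xs.length →
    ((pvPass1 xs mx).getD i false = true ↔
      (pvLtB mx (xs.getD i 0) = true ∨ ∃ k, k < i ∧ xs.getD i 0 < xs.getD k 0)) := by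
  intro xs
  induction xs with
  | nil => intro _ i h; simp at h
  | cons x xs ih =>
    intro mx i hi
    cases i with
    | zero => simp [pvPass1]
    | succ i =>
      have hi' : i < xs.length := by simpa using hi
      simp only [pvPass1, List.getD_cons_succ]
      rw [ih (pvOmax mx x) i hi']
      rw [pvLtB_omax]
      constructor
      · rintro (h | ⟨k, hk, hlt⟩)
        · rcases Bool.or_eq_true_iff.mp h with h | h
          · exact Or.inl h
          · exact Or.inr ⟨0, Nat.succ_pos _, by simpa using of_decide_eq_true h⟩
        · exact Or.inr ⟨k + 1, by omega, by simpa using hlt⟩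
      · rintro (h | ⟨k, hk, hlt⟩)
        · exact Or.inl (Bool.or_eq_true_iff.mpr (Or.inl h))
        · cases k with
          | zero => exact Or.inl (Bool.or_eq_true_iff.mpr (Or.inr (by simpa using hlt)))
          | succ k => exact Or.inr ⟨k, by omega, by simpa using hlt⟩

theorem pass2_spec : ∀ (l : List (Int × Bool)) (mn : Option Int) (i : Nat), i < l.length →
    ((pvPass2 l mn).getD i false = true ↔
      ((l.getD i (0, false)).2 = true ∨ pvGtB mn (l.getD i (0, false)).1 = true ∨
        ∃ k, k < i ∧ (l.getD k (0, false)).1 < (l.getD i (0, false)).1)) := by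
  intro l
  induction l with
  | nil => intro _ i h; simp at h
  | cons p l ih =>
    intro mn i hi
    obtain ⟨x, m⟩ := p
    cases i with
    | zero => simp [pvPass2]
    | succ i =>
      have hi' : i < l.length := by simpa using hi
      simp only [pvPass2, List.getD_cons_succ]
      rw [ih (pvOmin mn x) i hi']
      rw [pvGtB_omin]
      constructor
      · rintro (h | h | ⟨k, hk, hlt⟩)
        · exact Or.inl h
        · rcases Bool.or_eq_true_iff.mp h with h | h
          · exact Or.inr (Or.inl h)
          · exact Or.inr (Or.inr ⟨0, Nat.succ_pos _, by simpa using of_decide_eq_true h⟩)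
        · exact Or.inr (Or.inr ⟨k + 1, by omega, by simpa using hlt⟩)
      · rintro (h | h | ⟨k, hk, hlt⟩)
        · exact Or.inl h
        · exact Or.inr (Or.inl (Bool.or_eq_true_iff.mpr (Or.inl h)))
        · cases k with
          | zero => exact Or.inr (Or.inl (Bool.or_eq_true_iff.mpr (Or.inr (by simpa using hlt))))
          | succ k => exact Or.inr (Or.inr ⟨k, by omega, by simpa using hlt⟩)

-- marked2 characterisation: element i is marked iff it is in some inversion
theorem pv_getD_reverse {α : Type} (ys : List α) (d : α) (i : Nat) (hi : i < ys.length) :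
    ys.reverse.getD i d = ys.getD (ys.length - 1 - i) d := by
  rw [List.getD_eq_getElem _ _ (by simpa using hi), List.getElem_reverse,
      List.getD_eq_getElem _ _ (by omega)]

theorem marked2_spec (pos : List Int) (i : Nat) (hi : i < pos.length) :
    (((pvPass2 ((pos.zip (pvPass1 pos none)).reverse) none).reverse).getD i false = true ↔
      ((∃ k, k < i ∧ pos.getD i 0 < pos.getD k 0) ∨
        ∃ j, i < j ∧ j < pos.length ∧ pos.getD j 0 < pos.getD i 0)) := by
  have hm : (pvPass1 pos none).length = pos.length := pass1_length pos none
  have hz : (pos.zip (pvPass1 pos none)).length = pos.length := by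
    rw [List.length_zip, hm]; omega
  have hl : ((pos.zip (pvPass1 pos none)).reverse).length = pos.length := by
    simpa using hz
  have hp2 : (pvPass2 ((pos.zip (pvPass1 pos none)).reverse) none).length = pos.length := by
    rw [pass2_length]; exact hl
  have hzl : ∀ (t : Nat), t < pos.length →
      (pos.zip (pvPass1 pos none)).getD t (0, false)
        = (pos.getD t 0, (pvPass1 pos none).getD t false) := by
    intro t ht
    rw [List.getD_eq_getElem _ _ (by omega), List.getElem_zip,
        List.getD_eq_getElem _ _ ht, List.getD_eq_getElem _ _ (by omega)]
  have hrl : ∀ (t : Nat), t < pos.length →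
      ((pos.zip (pvPass1 pos none)).reverse).getD t (0, false)
        = (pos.zip (pvPass1 pos none)).getD (pos.length - 1 - t) (0, false) := by
    intro t ht
    rw [pv_getD_reverse _ _ _ (by omega), hz]
  -- step 1: outer reverse
  rw [pv_getD_reverse _ _ _ (by omega), hp2]
  -- step 2: pass2_spec at index pos.length - 1 - i
  rw [pass2_spec _ none _ (by omega)]
  rw [hrl _ (by omega), hzl _ (by omega)]
  have hii : pos.length - 1 - (pos.length - 1 - i) = i := by omega
  rw [hii]
  simp only [pvGtB, Bool.false_eq_true, false_or]
  rw [pass1_spec _ none _ hi]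
  simp only [pvLtB, Bool.false_eq_true, false_or]
  constructor
  · rintro (h | h)
    · exact Or.inl h
    · obtain ⟨k, hk, hlt⟩ := h
      rw [hrl _ (by omega), hzl _ (by omega)] at hlt
      exact Or.inr ⟨pos.length - 1 - k, by omega, by omega, hlt⟩
  · rintro (h | ⟨j, hij, hjL, hlt⟩)
    · exact Or.inl h
    · refine Or.inr ⟨pos.length - 1 - j, by omega, ?_⟩
      rw [hrl _ (by omega), hzl _ (by omega)]
      have : pos.length - 1 - (pos.length - 1 - j) = j := by omega
      rw [this]
      exact hlt


-- membership in A's nested-loop set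
theorem memA (po eo : List Int) (v : Int) :
    (v ∈ (PySem.List.pyRange 0 (eo.length : Int) 1).foldl (fun s i =>
      (PySem.List.pyRange (i + 1) (eo.length : Int) 1).foldl (fun s j =>
        if (pvPositions po).getD (PySem.List.pyGetD eo j 0) 0 <
           (pvPositions po).getD (PySem.List.pyGetD eo i 0) 0 then
          PySem.Set.add (PySem.Set.add s (PySem.List.pyGetD eo i 0)) (PySem.List.pyGetD eo j 0)
        else s) s) PySem.Set.empty) ↔
    ∃ i j : Nat, i < j ∧ j < eo.length ∧
      (pvPositions po).getD (eo.getD j 0) 0 < (pvPositions po).getD (eo.getD i 0) 0 ∧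
      (v = eo.getD i 0 ∨ v = eo.getD j 0) := by
  have hg : ∀ (t : Int), 0 ≤ t → t < (eo.length : Int) →
      PySem.List.pyGetD eo t 0 = eo.getD t.toNat 0 := by
    intro t h0 h1
    rw [PySem.List.pyGetD_eq_getElem eo 0 h0 h1, List.getD_eq_getElem _ _ (by omega)]
  rw [pv_mem_foldl v
      (fun i => ∃ j ∈ PySem.List.pyRange (i + 1) (eo.length : Int) 1,
        ((pvPositions po).getD (PySem.List.pyGetD eo j 0) 0 <
          (pvPositions po).getD (PySem.List.pyGetD eo i 0) 0 ∧
          (v = PySem.List.pyGetD eo i 0 ∨ v = PySem.List.pyGetD eo j 0)))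
      _ ?_]
  · simp only [PySem.Set.empty, List.not_mem_nil, false_or, PySem.List.mem_pyRange_one]
    constructor
    · rintro ⟨i, ⟨h0i, hin⟩, j, ⟨hij, hjn⟩, hc, hv⟩
      refine ⟨i.toNat, j.toNat, by omega, by omega, ?_, ?_⟩
      · rw [← hg i h0i hin, ← hg j (by omega) hjn]; exact hc
      · rw [← hg i h0i hin, ← hg j (by omega) hjn]; exact hv
    · rintro ⟨i, j, hij, hjn, hc, hv⟩
      refine ⟨(i : Int), ⟨by omega, by omega⟩, (j : Int), ⟨by omega, by omega⟩, ?_, ?_⟩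
      · rw [hg (i : Int) (by omega) (by omega), hg (j : Int) (by omega) (by omega)]
        simpa using hc
      · rw [hg (i : Int) (by omega) (by omega), hg (j : Int) (by omega) (by omega)]
        simpa using hv
  · intro s i
    refine pv_mem_foldl v _ _ ?_ _ s
    intro s' j
    split_ifs with h
    · simp only [PySem.Set.mem_add]
      constructor
      · rintro ((h' | h') | h')
        · exact Or.inl h'
        · exact Or.inr ⟨h, Or.inl h'⟩
        · exact Or.inr ⟨h, Or.inr h'⟩
      · rintro (h' | ⟨_, (h' | h')⟩)
        · exact Or.inl (Or.inl h')
        · exact Or.inl (Or.inr h')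
        · exact Or.inr h'
    · constructor
      · exact fun h' => Or.inl h'
      · rintro (h' | ⟨hc, _⟩)
        · exact h'
        · exact absurd hc h

-- A's set has no duplicates
theorem nodupA (po eo : List Int) :
    ((PySem.List.pyRange 0 (eo.length : Int) 1).foldl (fun s i =>
      (PySem.List.pyRange (i + 1) (eo.length : Int) 1).foldl (fun s j =>
        if (pvPositions po).getD (PySem.List.pyGetD eo j 0) 0 <
           (pvPositions po).getD (PySem.List.pyGetD eo i 0) 0 then
          PySem.Set.add (PySem.Set.add s (PySem.List.pyGetD eo i 0)) (PySem.List.pyGetD eo j 0)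
        else s) s) PySem.Set.empty).Nodup := by
  refine pv_nodup_foldl _ ?_ _ _ (by simp [PySem.Set.empty])
  intro s i hs
  refine pv_nodup_foldl _ ?_ _ _ hs
  intro s' j hs'
  split_ifs with h
  · exact PySem.Set.nodup_add _ _ (PySem.Set.nodup_add _ _ hs')
  · exact hs'

-- membership in B's set of marked values
theorem memB (eo : List Int) (m2 : List Bool) (hL : m2.length = eo.length) (v : Int) :
    (v ∈ PySem.Set.ofList (((eo.zip m2).filter (fun pm => pm.2)).map (fun pm => pm.1)) ↔
      ∃ i, i < eo.length ∧ v = eo.getD i 0 ∧ m2.getD i false = true) := by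
  rw [PySem.Set.mem_ofList]
  simp only [List.mem_map, List.mem_filter]
  constructor
  · rintro ⟨p, ⟨hp, h2⟩, h1⟩
    rw [List.mem_iff_getElem] at hp
    obtain ⟨i, hi, he⟩ := hp
    have hiz : i < eo.length := by rw [List.length_zip] at hi; omega
    rw [List.getElem_zip] at he
    refine ⟨i, hiz, ?_, ?_⟩
    · rw [List.getD_eq_getElem _ _ hiz, ← h1, ← he]
    · rw [List.getD_eq_getElem _ _ (by omega), ← h2, ← he]
  · rintro ⟨i, hi, hv, hm⟩
    have h2 : m2[i]'(by omega) = true := by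
      rw [← List.getD_eq_getElem m2 false (by omega)]; exact hm
    have h1 : eo[i]'hi = eo.getD i 0 := (List.getD_eq_getElem _ _ hi).symm
    refine ⟨(eo.getD i 0, true), ⟨?_, rfl⟩, hv.symm⟩
    rw [List.mem_iff_getElem]
    refine ⟨i, by rw [List.length_zip]; omega, ?_⟩
    rw [List.getElem_zip, h2, h1]

theorem pv_getD_map (f : Int → Int) (eo : List Int) (t : Nat) (ht : t < eo.length) :
    (eo.map f).getD t 0 = f (eo.getD t 0) := by
  rw [List.getD_eq_getElem _ _ (by simpa using ht), List.getElem_map,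
      List.getD_eq_getElem _ _ ht]

-- pure logic: a value is in some inverted pair iff some occurrence of it is marked
theorem pv_bridge (L : Nat) (e g : Nat → Int) (v : Int) :
    ((∃ i j : Nat, i < j ∧ j < L ∧ g j < g i ∧ (v = e i ∨ v = e j)) ↔
      ∃ i, i < L ∧ v = e i ∧
        ((∃ k, k < i ∧ g i < g k) ∨ ∃ j, i < j ∧ j < L ∧ g j < g i)) := by
  constructor
  · rintro ⟨i, j, hij, hjL, hg, (rfl | rfl)⟩
    · exact ⟨i, by omega, rfl, Or.inr ⟨j, hij, hjL, hg⟩⟩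
    · exact ⟨j, hjL, rfl, Or.inl ⟨i, hij, hg⟩⟩
  · rintro ⟨i, hiL, rfl, (⟨k, hk, hg⟩ | ⟨j, hij, hjL, hg⟩)⟩
    · exact ⟨k, i, hk, hiL, hg, Or.inr rfl⟩
    · exact ⟨i, j, hij, hjL, hg, Or.inl rfl⟩

-- ===== VERDICT (by name: the statement is the Claim_ definition above) =====
theorem getInaccurateProcesses_spec : Claim_equal_getInaccurateProcesses := by
  intro po eo _ _
  unfold Spec_getInaccurateProcesses
  simp only [getInaccurateProcesses, getInaccurateProcesses_alt]
  have hposlen : (eo.map (fun p => (pvPositions po).getD p 0)).length = eo.length := by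
    simp
  have hm2len :
      ((pvPass2 (((eo.map (fun p => (pvPositions po).getD p 0)).zip
        (pvPass1 (eo.map (fun p => (pvPositions po).getD p 0)) none)).reverse) none).reverse).length
        = eo.length := by
    simp [pass2_length, List.length_zip, pass1_length]
  have hperm :
      ((PySem.List.pyRange 0 (eo.length : Int) 1).foldl (fun s i =>
        (PySem.List.pyRange (i + 1) (eo.length : Int) 1).foldl (fun s j =>
          if (pvPositions po).getD (PySem.List.pyGetD eo j 0) 0 <
             (pvPositions po).getD (PySem.List.pyGetD eo i 0) 0 then
            PySem.Set.add (PySem.Set.add s (PySem.List.pyGetD eo i 0)) (PySem.List.pyGetD eo j 0)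
          else s) s) PySem.Set.empty).Perm
      (PySem.Set.ofList (((eo.zip
        ((pvPass2 (((eo.map (fun p => (pvPositions po).getD p 0)).zip
          (pvPass1 (eo.map (fun p => (pvPositions po).getD p 0)) none)).reverse) none).reverse)).filter
            (fun pm => pm.2)).map (fun pm => pm.1))) := by
    rw [List.perm_ext_iff_of_nodup (nodupA po eo) (PySem.Set.nodup_ofList _)]
    intro a
    rw [memA, memB _ _ hm2len,
        pv_bridge eo.length (fun t => eo.getD t 0)
          (fun t => (pvPositions po).getD (eo.getD t 0) 0) a]
    refine exists_congr fun i => ?_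
    constructor
    · rintro ⟨hi, hv, hm⟩
      refine ⟨hi, hv, ?_⟩
      rw [marked2_spec (eo.map (fun p => (pvPositions po).getD p 0)) i (by omega)]
      rcases hm with ⟨k, hk, hg⟩ | ⟨j, hij, hjL, hg⟩
      · rw [← pv_getD_map (fun p => (pvPositions po).getD p 0) _ i hi,
            ← pv_getD_map (fun p => (pvPositions po).getD p 0) _ k (by omega)] at hg
        exact Or.inl ⟨k, hk, hg⟩
      · rw [← pv_getD_map (fun p => (pvPositions po).getD p 0) _ i hi,
            ← pv_getD_map (fun p => (pvPositions po).getD p 0) _ j hjL] at hg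
        exact Or.inr ⟨j, hij, by omega, hg⟩
    · rintro ⟨hi, hv, hm⟩
      refine ⟨hi, hv, ?_⟩
      rw [marked2_spec (eo.map (fun p => (pvPositions po).getD p 0)) i (by omega)] at hm
      rcases hm with ⟨k, hk, hg⟩ | ⟨j, hij, hjL, hg⟩
      · rw [pv_getD_map _ _ i hi, pv_getD_map _ _ k (by omega)] at hg
        exact Or.inl ⟨k, hk, hg⟩
      · rw [hposlen] at hjL
        rw [pv_getD_map _ _ i hi, pv_getD_map _ _ j hjL] at hg
        exact Or.inr ⟨j, hij, hjL, hg⟩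
  simp only [PySem.Set.len]
  exact_mod_cast hperm.length_eq
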